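-- pv_equiv track=rewrite | github.com/chrisbruh26/RootAccess | scalable_overhaul/game_with_json/npcs_use_items/npc_behavior-v6.py | _extract_gang_members
-- ===== SOURCE A (Python) =====
-- import collections
--
-- def _extract_gang_members(messages):
--     """Extract gang members from a list of messages."""
--     gang_members = collections.defaultdict(list)
--
--     for message in messages:
--         # Look for gang member references
--         if "member" in message:
--             # Extract gang name and member name
--             parts = message.split()
--
--             # Find the position of "member" in the message
--             if "member" in parts:
--                 member_idx = parts.index("member")
--
--                 # Gang name should be right before "member"
--                 if member_idx > 1 and parts[member_idx-2] == "The":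
--                     gang_name = parts[member_idx-1]
--
--                     # Member name should be right after "member"
--                     if member_idx + 1 < len(parts):
--                         member_name = parts[member_idx + 1]
--                         # Remove any punctuation from member name
--                         member_name = member_name.rstrip('.,!?:;')
--
--                         # Only add unique members
--                         if member_name not in gang_members[gang_name]:
--                             gang_members[gang_name].append(member_name)
--
--         # Also check for "affected:" messages which have a different format
--         elif "affected:" in message:
--             parts = message.split()
--             if len(parts) >= 3:
--                 gang_name = parts[0]
--                 member_name = parts[2]
--                 # Remove any punctuation from member name
--                 member_name = member_name.rstrip('.,!?:;')
--
--                 if member_name not in gang_members[gang_name]: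
--                     gang_members[gang_name].append(member_name)
--
--     return gang_members
-- ===== SOURCE B (Python) =====
-- import collections
--
--
-- def _parse_member_message(message):
--     """Return the (gang_name, member_name) pair one message contributes, or None."""
--     if "member" in message:
--         parts = message.split()
--         if "member" in parts:
--             i = parts.index("member")
--             if i > 1 and parts[i - 2] == "The" and i + 1 < len(parts):
--                 return (parts[i - 1], parts[i + 1].rstrip('.,!?:;'))
--         return None
--     if "affected:" in message:
--         parts = message.split()
--         if len(parts) >= 3:
--             return (parts[0], parts[2].rstrip('.,!?:;'))
--     return None
--
--
-- def _extract_gang_members(messages):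
--     """Extract gang members from a list of messages."""
--     pairs = [p for p in map(_parse_member_message, messages) if p is not None]
--     gang_members = collections.defaultdict(list)
--     for gang in dict.fromkeys(g for g, _ in pairs):
--         gang_members[gang] = list(dict.fromkeys(m for g, m in pairs if g == gang))
--     return gang_members
-- ===== Notes on version B (the rewrite author's own statement) =====
-- stated objective: alternative
-- what changed: A builds the result in one loop that mutates a defaultdict per message; B first maps every message through a parser helper to a flat list of (gang, member) pairs, then groups: it takes the first-occurrence-ordered distinct gangs (dict.fromkeys) and, per gang, the order-preserving dedup of that gang's members.
import Mathlib
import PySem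

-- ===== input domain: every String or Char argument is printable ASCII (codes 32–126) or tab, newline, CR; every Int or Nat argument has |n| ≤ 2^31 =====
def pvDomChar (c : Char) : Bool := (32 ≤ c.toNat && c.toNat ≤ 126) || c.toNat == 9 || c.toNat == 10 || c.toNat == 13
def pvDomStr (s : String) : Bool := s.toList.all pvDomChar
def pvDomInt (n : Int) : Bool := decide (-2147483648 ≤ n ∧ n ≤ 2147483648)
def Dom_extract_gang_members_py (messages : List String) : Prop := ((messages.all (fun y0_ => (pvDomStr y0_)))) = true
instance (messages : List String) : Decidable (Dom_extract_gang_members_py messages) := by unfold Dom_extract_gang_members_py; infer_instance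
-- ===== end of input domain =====

-- B re-decomposes A's single mutating loop into parse-then-group (flat pair list, then first-occurrence
-- grouping with per-gang dedup); objective: alternative decomposition, same observable result.

-- hand port of Python's  s.rstrip('.,!?:;')  (PySem has no rstrip-with-chars): drop the longest
-- trailing run of characters from '.,!?:;'; exact for every string.
def pyRstripPunct (s : String) : String :=
  String.ofList ((s.toList.reverse.dropWhile (fun c => (".,!?:;".toList).contains c)).reverse)

-- ===== PORT A =====
-- literal transliteration of _extract_gang_members: one fold over messages mutating a
-- defaultdict(list) (missing key reads as []); the loop body is the named step below;
-- `if "member" in parts: i = parts.index("member")` is rendered as the match on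
-- PySem.List.index? (none exactly when "member" is not a token).
def extract_gang_members_py_step (gang_members : PySem.Dict String (List String))
    (message : String) : PySem.Dict String (List String) :=
  if PySem.Str.isIn "member" message then
    let parts := PySem.Str.split₀ message
    match PySem.List.index? parts "member" with
    | some member_idx =>
      if 1 < member_idx then
        -- parts[member_idx-2], parts[member_idx-1]: in range because member_idx > 1
        if parts.getD (member_idx - 2) "" = "The" then
          let gang_name := parts.getD (member_idx - 1) ""
          if member_idx + 1 < parts.length then
            let member_name := pyRstripPunct (parts.getD (member_idx + 1) "")
            let cur := gang_members.getD gang_name []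
            if cur.contains member_name then gang_members
            else gang_members.insert gang_name (cur ++ [member_name])
          else gang_members
        else gang_members
      else gang_members
    | none => gang_members
  else if PySem.Str.isIn "affected:" message then
    let parts := PySem.Str.split₀ message
    if 3 ≤ parts.length then
      let gang_name := parts.getD 0 ""
      let member_name := pyRstripPunct (parts.getD 2 "")
      let cur := gang_members.getD gang_name []
      if cur.contains member_name then gang_members
      else gang_members.insert gang_name (cur ++ [member_name])
    else gang_members
  else gang_members

def extract_gang_members_py (messages : List String) : List (String × List String) :=
  (messages.foldl extract_gang_members_py_step
    (PySem.Dict.empty : PySem.Dict String (List String))).items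

-- ===== PORT B =====
-- port of Source B: helper parsing ONE message to its (gang, member) pair (or none) …
def parse_member_message (message : String) : Option (String × String) :=
  if PySem.Str.isIn "member" message then
    let parts := PySem.Str.split₀ message
    match PySem.List.index? parts "member" with
    | some i =>
      if 1 < i ∧ parts.getD (i - 2) "" = "The" ∧ i + 1 < parts.length then
        some (parts.getD (i - 1) "", pyRstripPunct (parts.getD (i + 1) ""))
      else none
    | none => none
  else if PySem.Str.isIn "affected:" message then
    let parts := PySem.Str.split₀ message
    if 3 ≤ parts.length then
      some (parts.getD 0 "", pyRstripPunct (parts.getD 2 ""))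
    else none
  else none

-- … then group: first-occurrence-ordered distinct gangs (dict.fromkeys = PySem.List.dedup),
-- and for each gang the dedup of its members, inserted into a fresh dict.
def extract_gang_members_py_alt (messages : List String) : List (String × List String) :=
  let pairs := messages.filterMap parse_member_message
  let gangs := PySem.List.dedup (pairs.map Prod.fst)
  (gangs.foldl (fun d g =>
      d.insert g (PySem.List.dedup ((pairs.filter (fun p => p.1 == g)).map Prod.snd)))
    (PySem.Dict.empty : PySem.Dict String (List String))).items

-- ===== PRECONDITION & SPEC =====
def Spec_extract_gang_members_py (messages : List String) (out : List (String × List String)) : Prop := out = extract_gang_members_py_alt messages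
instance (messages : List String) (out : List (String × List String)) : Decidable (Spec_extract_gang_members_py messages out) := by unfold Spec_extract_gang_members_py; infer_instance

-- ===== CLAIM (what is proved, stated in full; the proofs are below) =====
def Claim_equal_extract_gang_members_py : Prop := ∀ (messages : List String), Dom_extract_gang_members_py messages → Spec_extract_gang_members_py messages (extract_gang_members_py messages)

-- ===== LEMMAS AND PROOFS =====

-- A's per-message dict update, abstracted over the parsed (gang, member) pair
def pvAdd (d : PySem.Dict String (List String)) (p : String × String) : PySem.Dict String (List String) :=
  let cur := d.getD p.1 []
  if cur.contains p.2 then d else d.insert p.1 (cur ++ [p.2])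

def pvUpd (m : String) (cur : List String) : List String :=
  if cur.contains m then cur else cur ++ [m]

lemma pvStep_eq (d : PySem.Dict String (List String)) (message : String) :
    extract_gang_members_py_step d message
      = (match parse_member_message message with
         | some p => pvAdd d p
         | none => d) := by
  unfold extract_gang_members_py_step parse_member_message pvAdd
  dsimp only
  by_cases hm : PySem.Str.isIn "member" message = true
  · rw [if_pos hm, if_pos hm]
    cases hi : PySem.List.index? (PySem.Str.split₀ message) "member" with
    | none => rfl
    | some i =>
      dsimp only
      by_cases h1 : 1 < i
      · by_cases h2 : (PySem.Str.split₀ message).getD (i - 2) "" = "The"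
        · by_cases h3 : i + 1 < (PySem.Str.split₀ message).length
          · rw [if_pos h1, if_pos h2, if_pos h3, if_pos (And.intro h1 (And.intro h2 h3))]
          · rw [if_pos h1, if_pos h2, if_neg h3, if_neg (fun hc => h3 hc.2.2)]
        · rw [if_pos h1, if_neg h2, if_neg (fun hc => h2 hc.2.1)]
      · rw [if_neg h1, if_neg (fun hc => h1 hc.1)]
  · rw [if_neg hm, if_neg hm]
    by_cases ha : PySem.Str.isIn "affected:" message = true
    · rw [if_pos ha, if_pos ha]
      by_cases h3 : 3 ≤ (PySem.Str.split₀ message).length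
      · rw [if_pos h3, if_pos h3]
      · rw [if_neg h3, if_neg h3]
    · rw [if_neg ha, if_neg ha]

lemma pv_contains_eq_keys_contains (d : PySem.Dict String (List String)) (k : String) :
    d.contains k = d.keys.contains k := by
  obtain ⟨items⟩ := d
  simp only [PySem.Dict.contains, PySem.Dict.keys]
  induction items with
  | nil => rfl
  | cons p t ih =>
    simp only [List.any_cons, List.map_cons, List.contains_cons, ih]
    rw [BEq.comm]

lemma pv_contains_of_getD_ne (d : PySem.Dict String (List String)) (k : String)
    (h : d.getD k [] ≠ []) : d.contains k = true := by
  simp only [PySem.Dict.getD, PySem.Dict.get?, PySem.Dict.contains] at *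
  cases hf : List.find? (fun p => p.1 == k) d.items with
  | none => simp [hf] at h
  | some p =>
    have hpk := List.find?_some hf
    exact List.any_eq_true.mpr ⟨p, List.mem_of_find?_eq_some hf, hpk⟩

lemma pv_keys_insert (d : PySem.Dict String (List String)) (k : String) (v : List String) :
    (d.insert k v).keys = if d.contains k then d.keys else d.keys ++ [k] := by
  simp only [PySem.Dict.insert, PySem.Dict.keys]
  split
  · simp only [List.map_map]
    apply List.map_congr_left
    intro p _
    by_cases hpk : p.1 = k
    · simp [hpk]
    · simp [hpk]
  · simp

lemma pv_keys_add (d : PySem.Dict String (List String)) (p : String × String) :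
    (pvAdd d p).keys = PySem.Set.add d.keys p.1 := by
  unfold pvAdd PySem.Set.add PySem.Set.contains
  by_cases h : (d.getD p.1 []).contains p.2
  · simp only [h, if_pos]
    have hc : d.contains p.1 = true := by
      apply pv_contains_of_getD_ne
      intro he; rw [he] at h; simp at h
    rw [pv_contains_eq_keys_contains] at hc
    rw [if_pos hc]
  · simp only [h, Bool.false_eq_true, if_false]
    rw [pv_keys_insert, pv_contains_eq_keys_contains]

lemma pv_getD_add (d : PySem.Dict String (List String)) (p : String × String) (g : String) :
    (pvAdd d p).getD g [] = if g = p.1 then pvUpd p.2 (d.getD p.1 []) else d.getD g [] := by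
  unfold pvAdd pvUpd
  dsimp only
  by_cases h : (d.getD p.1 []).contains p.2 = true
  · rw [if_pos h]
    by_cases hg : g = p.1
    · rw [if_pos hg, if_pos h, hg]
    · rw [if_neg hg]
  · rw [if_neg h]
    by_cases hg : g = p.1
    · subst hg
      rw [PySem.Dict.getD_insert_self, if_pos rfl, if_neg h]
    · rw [PySem.Dict.getD_insert_of_ne d _ _ hg, if_neg hg]

lemma pv_keys_foldl (pairs : List (String × String)) (d : PySem.Dict String (List String)) :
    (pairs.foldl pvAdd d).keys = PySem.Set.update d.keys (pairs.map Prod.fst) := by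
  induction pairs generalizing d with
  | nil => rfl
  | cons p t ih =>
    simp only [List.foldl_cons, List.map_cons]
    rw [ih, pv_keys_add]
    rfl

lemma pv_getD_foldl (pairs : List (String × String)) (d : PySem.Dict String (List String)) (g : String) :
    (pairs.foldl pvAdd d).getD g []
      = ((pairs.filter (fun p => p.1 == g)).map Prod.snd).foldl (fun cur m => pvUpd m cur) (d.getD g []) := by
  induction pairs generalizing d with
  | nil => rfl
  | cons p t ih =>
    simp only [List.foldl_cons, List.filter_cons]
    by_cases hpg : p.1 = g
    · simp only [hpg, beq_self_eq_true, if_pos, List.map_cons, List.foldl_cons]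
      rw [ih, pv_getD_add, if_pos hpg.symm, hpg]
    · have hbeq : (p.1 == g) = false := by simp [hpg]
      simp only [hbeq, Bool.false_eq_true, if_false]
      rw [ih, pv_getD_add, if_neg (fun hc => hpg hc.symm)]

lemma pv_foldl_step (msgs : List String) (d : PySem.Dict String (List String)) :
    msgs.foldl extract_gang_members_py_step d
      = (msgs.filterMap parse_member_message).foldl pvAdd d := by
  induction msgs generalizing d with
  | nil => rfl
  | cons m t ih =>
    simp only [List.foldl_cons, List.filterMap_cons]
    rw [pvStep_eq]
    cases h : parse_member_message m with
    | none => exact ih d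
    | some p => simp only [List.foldl_cons]; exact ih (pvAdd d p)

lemma pv_foldl_upd_eq_dedup (ms : List String) :
    ms.foldl (fun cur m => pvUpd m cur) [] = PySem.List.dedup ms := by
  have h : (fun cur m => pvUpd m cur) = (PySem.Set.add (α := String)) := by
    funext cur m; rfl
  rw [h]; rfl

-- ===== VERDICT (by name: the statement is the Claim_ definition above) =====
theorem extract_gang_members_py_spec : Claim_equal_extract_gang_members_py := by
  intro messages _
  unfold Spec_extract_gang_members_py extract_gang_members_py
  dsimp only [extract_gang_members_py_alt]
  rw [pv_foldl_step]
  set pairs := messages.filterMap parse_member_message with hpairs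
  have hkeys : (pairs.foldl pvAdd PySem.Dict.empty).keys = PySem.List.dedup (pairs.map Prod.fst) := by
    rw [pv_keys_foldl]; rfl
  have hnd : (pairs.foldl pvAdd PySem.Dict.empty).keys.Nodup := by
    rw [hkeys]; exact PySem.List.nodup_dedup _
  rw [PySem.Dict.items_eq_map_keys _ hnd [], hkeys]
  rw [PySem.Dict.items_foldl_insert_fresh (PySem.List.dedup (pairs.map Prod.fst))
        (fun g => g) (fun g => PySem.List.dedup ((pairs.filter (fun p => p.1 == g)).map Prod.snd))
        PySem.Dict.empty
        (fun a _ => PySem.Dict.contains_empty a)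
        (by simp)]
  have hemp : (PySem.Dict.empty : PySem.Dict String (List String)).items = [] := rfl
  rw [hemp, List.nil_append]
  apply List.map_congr_left
  intro g _
  rw [pv_getD_foldl pairs PySem.Dict.empty g]
  have hd0 : (PySem.Dict.empty : PySem.Dict String (List String)).getD g [] = [] := rfl
  rw [hd0, pv_foldl_upd_eq_dedup]
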